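-- pv_equiv track=rewrite | github.com/bpatzin2/advent-of-code-2021 | day9.py | get_adj_coords
-- ===== SOURCE A (Python) =====
-- def get_adj_coords(coord, grid):
--     result = []
--     dirs = [-1, 0, 1]
--     for x_dir in dirs:
--         for y_dir in dirs:
--             adj_coord = (coord[0] + x_dir, coord[1] + y_dir)
--             if adj_coord == coord:
--                 continue
--             if (0 <= adj_coord[0] < len(grid[0])) and (0 <= adj_coord[1] < len(grid)):
--                 result.append(adj_coord)
--     return result
-- ===== SOURCE B (Python) =====
-- def get_adj_coords(coord, grid):
--     return [(x, y)
--             for x in range(len(grid[0]))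
--             for y in range(len(grid))
--             if max(abs(x - coord[0]), abs(y - coord[1])) == 1]
-- ===== Notes on version B (the rewrite author's own statement) =====
-- stated objective: alternative
-- what changed: B scans every cell of the grid once and selects the cells at Chebyshev distance exactly 1 from coord, instead of A's enumeration of the 9 direction offsets with a center-skip and per-candidate bounds test.
-- outside the precondition, e.g. on get_adj_coords((-11, 10), []): A returns [], B raises IndexError
import Mathlib
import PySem

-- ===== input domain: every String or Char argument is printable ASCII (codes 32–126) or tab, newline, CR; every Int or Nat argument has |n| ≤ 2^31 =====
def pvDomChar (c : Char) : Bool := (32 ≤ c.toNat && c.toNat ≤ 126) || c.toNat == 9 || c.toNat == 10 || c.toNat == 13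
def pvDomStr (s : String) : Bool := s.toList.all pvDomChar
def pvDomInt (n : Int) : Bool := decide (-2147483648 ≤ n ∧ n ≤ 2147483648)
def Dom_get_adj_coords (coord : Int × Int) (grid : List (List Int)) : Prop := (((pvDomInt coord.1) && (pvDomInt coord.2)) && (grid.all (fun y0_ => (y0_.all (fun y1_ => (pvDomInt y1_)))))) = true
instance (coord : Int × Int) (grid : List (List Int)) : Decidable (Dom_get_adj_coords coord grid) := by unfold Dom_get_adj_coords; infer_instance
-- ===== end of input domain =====

-- B scans every grid cell once and keeps those at Chebyshev distance exactly 1 from coord,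
-- instead of A's scan of the 9 direction offsets with center-skip and bounds test (objective: alternative).

-- ===== PORT A =====
def get_adj_coords (coord : Int × Int) (grid : List (List Int)) : List (Int × Int) :=
  let dirs : List Int := [-1, 0, 1]
  dirs.foldl (fun result x_dir =>
    dirs.foldl (fun result y_dir =>
      let adj_coord : Int × Int := (coord.1 + x_dir, coord.2 + y_dir)
      if adj_coord = coord then result
      else if 0 ≤ adj_coord.1 ∧ adj_coord.1 < ((grid.headD []).length : Int) ∧
              0 ≤ adj_coord.2 ∧ adj_coord.2 < (grid.length : Int) then
        result ++ [adj_coord]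
      else result) result) []
  -- grid[0] ported as grid.headD []: exact whenever grid ≠ [] (guaranteed by Pre_)

-- ===== PORT B =====
def get_adj_coords_alt (coord : Int × Int) (grid : List (List Int)) : List (Int × Int) :=
  (PySem.List.pyRange 0 (((grid.headD []).length : Int)) 1).foldl (fun result x =>
    (PySem.List.pyRange 0 ((grid.length : Int)) 1).foldl (fun result y =>
      if max |x - coord.1| |y - coord.2| = (1 : Int) then result ++ [(x, y)] else result) result) []
  -- len(grid[0]) ported as (grid.headD []).length: exact whenever grid ≠ [] (Pre_)

-- ===== PRECONDITION & SPEC =====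
-- Pre_ excludes the empty grid: A raises IndexError at len(grid[0]) there (except when every
-- candidate x is negative, where short-circuit makes A return []); B always raises there.
def Pre_get_adj_coords (coord : Int × Int) (grid : List (List Int)) : Prop := grid ≠ []
instance (coord : Int × Int) (grid : List (List Int)) : Decidable (Pre_get_adj_coords coord grid) := by unfold Pre_get_adj_coords; infer_instance
def pvWitness_get_adj_coords : (Int × Int) × List (List Int) := ((1, 1), [[1, 2, 3], [4, 5, 6], [7, 8, 9]])

def Spec_get_adj_coords (coord : Int × Int) (grid : List (List Int)) (out : List (Int × Int)) : Prop := out = get_adj_coords_alt coord grid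
instance (coord : Int × Int) (grid : List (List Int)) (out : List (Int × Int)) : Decidable (Spec_get_adj_coords coord grid out) := by unfold Spec_get_adj_coords; infer_instance

-- ===== CLAIM (what is proved, stated in full; the proofs are below) =====
def Claim_equal_get_adj_coords : Prop := ∀ (coord : Int × Int) (grid : List (List Int)), Dom_get_adj_coords coord grid → Pre_get_adj_coords coord grid → Spec_get_adj_coords coord grid (get_adj_coords coord grid)

-- ===== LEMMAS AND PROOFS =====

-- strict lexicographic order on coordinate pairs: both outputs are sorted by it
def lexLT (p q : Int × Int) : Prop := p.1 < q.1 ∨ (p.1 = q.1 ∧ p.2 < q.2)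

lemma lexLT_asymm (a b : Int × Int) : lexLT a b → ¬ lexLT b a := by
  unfold lexLT; omega

-- two lists sorted by an asymmetric relation with the same members are equal
lemma eq_of_pairwise_of_mem_iff {α : Type} (R : α → α → Prop)
    (hasym : ∀ a b, R a b → ¬ R b a) :
    ∀ (l₁ l₂ : List α), l₁.Pairwise R → l₂.Pairwise R → (∀ x, x ∈ l₁ ↔ x ∈ l₂) → l₁ = l₂ := by
  intro l₁
  induction l₁ with
  | nil =>
    intro l₂ _ _ hmem
    cases l₂ with
    | nil => rfl
    | cons b t₂ => exact absurd ((hmem b).mpr List.mem_cons_self) List.not_mem_nil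
  | cons a t₁ ih =>
    intro l₂ h₁ h₂ hmem
    cases l₂ with
    | nil => exact absurd ((hmem a).mp List.mem_cons_self) List.not_mem_nil
    | cons b t₂ =>
      have hab : a = b := by
        rcases List.mem_cons.mp ((hmem a).mp List.mem_cons_self) with h | hat₂
        · exact h
        · rcases List.mem_cons.mp ((hmem b).mpr List.mem_cons_self) with h | hbt₁
          · exact h.symm
          · exact absurd ((List.pairwise_cons.mp h₁).1 b hbt₁)
              (hasym _ _ ((List.pairwise_cons.mp h₂).1 a hat₂))
      subst hab
      have htail : ∀ x, x ∈ t₁ ↔ x ∈ t₂ := by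
        intro x
        constructor
        · intro hx
          have hRa : R a x := (List.pairwise_cons.mp h₁).1 x hx
          rcases List.mem_cons.mp ((hmem x).mp (List.mem_cons_of_mem a hx)) with h | h
          · exact absurd hRa (h ▸ fun hr => hasym _ _ hr hr)
          · exact h
        · intro hx
          have hRa : R a x := (List.pairwise_cons.mp h₂).1 x hx
          rcases List.mem_cons.mp ((hmem x).mpr (List.mem_cons_of_mem a hx)) with h | h
          · exact absurd hRa (h ▸ fun hr => hasym _ _ hr hr)
          · exact h
      rw [ih t₂ (List.pairwise_cons.mp h₁).2 (List.pairwise_cons.mp h₂).2 htail]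

-- 'if p a: out.append(f a)' over a list, as filter-then-map
lemma foldl_filter_map {α β : Type} (p : α → Prop) [DecidablePred p] (f : α → β) :
    ∀ (l : List α) (r : List β),
      l.foldl (fun r a => if p a then r ++ [f a] else r) r
        = r ++ (l.filter (fun a => decide (p a))).map f := by
  intro l
  induction l with
  | nil => intro r; simp
  | cons a t ih =>
    intro r
    by_cases h : p a <;> simp [h, ih]

-- Chebyshev distance 1, arithmetically
lemma cheb_one (a b : Int) :
    max |a| |b| = (1 : Int) ↔ (-1 ≤ a ∧ a ≤ 1 ∧ -1 ≤ b ∧ b ≤ 1 ∧ ¬(a = 0 ∧ b = 0)) := by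
  rcases abs_cases a with ⟨h1, h2⟩ | ⟨h1, h2⟩ <;> rcases abs_cases b with ⟨h3, h4⟩ | ⟨h3, h4⟩ <;>
    rw [Int.max_def] <;> split_ifs <;> omega

-- the candidate row of A for one x-offset, and the selected row of B for one column x
def rowA (c1 c2 w h dx : Int) : List (Int × Int) :=
  (([-1, 0, 1] : List Int).filter (fun dy =>
    decide (¬((c1 + dx, c2 + dy) : Int × Int) = (c1, c2) ∧
      0 ≤ c1 + dx ∧ c1 + dx < w ∧ 0 ≤ c2 + dy ∧ c2 + dy < h))).map (fun dy => (c1 + dx, c2 + dy))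

def rowB (c1 c2 h x : Int) : List (Int × Int) :=
  ((PySem.List.pyRange 0 h 1).filter (fun y =>
    decide (max |x - c1| |y - c2| = (1 : Int)))).map (fun y => (x, y))

lemma A_eq_flat (c1 c2 : Int) (grid : List (List Int)) :
    get_adj_coords (c1, c2) grid
      = ([-1, 0, 1] : List Int).flatMap
          (rowA c1 c2 ((grid.headD []).length : Int) (grid.length : Int)) := by
  show ([-1, 0, 1] : List Int).foldl (fun result x_dir =>
      ([-1, 0, 1] : List Int).foldl (fun result y_dir =>
        if ((c1 + x_dir, c2 + y_dir) : Int × Int) = (c1, c2) then result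
        else if 0 ≤ c1 + x_dir ∧ c1 + x_dir < ((grid.headD []).length : Int) ∧
                0 ≤ c2 + y_dir ∧ c2 + y_dir < (grid.length : Int) then
          result ++ [(c1 + x_dir, c2 + y_dir)]
        else result) result) [] = _
  have houter : (fun (result : List (Int × Int)) (x_dir : Int) =>
      ([-1, 0, 1] : List Int).foldl (fun result y_dir =>
        if ((c1 + x_dir, c2 + y_dir) : Int × Int) = (c1, c2) then result
        else if 0 ≤ c1 + x_dir ∧ c1 + x_dir < ((grid.headD []).length : Int) ∧
                0 ≤ c2 + y_dir ∧ c2 + y_dir < (grid.length : Int) then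
          result ++ [(c1 + x_dir, c2 + y_dir)]
        else result) result)
      = (fun result dx =>
          result ++ rowA c1 c2 ((grid.headD []).length : Int) (grid.length : Int) dx) := by
    funext r dx
    have hinner : (fun (result : List (Int × Int)) (y_dir : Int) =>
        if ((c1 + dx, c2 + y_dir) : Int × Int) = (c1, c2) then result
        else if 0 ≤ c1 + dx ∧ c1 + dx < ((grid.headD []).length : Int) ∧
                0 ≤ c2 + y_dir ∧ c2 + y_dir < (grid.length : Int) then
          result ++ [(c1 + dx, c2 + y_dir)]
        else result)
        = (fun result dy =>
            if (¬((c1 + dx, c2 + dy) : Int × Int) = (c1, c2) ∧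
                0 ≤ c1 + dx ∧ c1 + dx < ((grid.headD []).length : Int) ∧
                0 ≤ c2 + dy ∧ c2 + dy < (grid.length : Int)) then
              result ++ [(c1 + dx, c2 + dy)]
            else result) := by
      funext r' dy
      by_cases h1 : ((c1 + dx, c2 + dy) : Int × Int) = (c1, c2) <;>
        by_cases h2 : 0 ≤ c1 + dx ∧ c1 + dx < ((grid.headD []).length : Int) ∧
          0 ≤ c2 + dy ∧ c2 + dy < (grid.length : Int) <;>
        simp [h1, h2]
    rw [hinner, foldl_filter_map]
    rfl
  rw [houter, PySem.List.foldl_append_eq_flatMap]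
  simp

lemma B_eq_flat (c1 c2 : Int) (grid : List (List Int)) :
    get_adj_coords_alt (c1, c2) grid
      = (PySem.List.pyRange 0 ((grid.headD []).length : Int) 1).flatMap
          (rowB c1 c2 (grid.length : Int)) := by
  show (PySem.List.pyRange 0 ((grid.headD []).length : Int) 1).foldl (fun result x =>
      (PySem.List.pyRange 0 (grid.length : Int) 1).foldl (fun result y =>
        if max |x - c1| |y - c2| = (1 : Int) then result ++ [(x, y)] else result) result) [] = _
  have houter : (fun (result : List (Int × Int)) (x : Int) =>
      (PySem.List.pyRange 0 (grid.length : Int) 1).foldl (fun result y =>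
        if max |x - c1| |y - c2| = (1 : Int) then result ++ [(x, y)] else result) result)
      = (fun result x => result ++ rowB c1 c2 (grid.length : Int) x) := by
    funext r x
    rw [foldl_filter_map (fun y => max |x - c1| |y - c2| = (1 : Int)) (fun y => (x, y))]
    rfl
  rw [houter, PySem.List.foldl_append_eq_flatMap]
  simp

-- both flatMap forms have the same members: the in-bounds cells at Chebyshev distance 1
lemma mem_A_flat (c1 c2 w h : Int) (p : Int × Int) :
    p ∈ ([-1, 0, 1] : List Int).flatMap (rowA c1 c2 w h)
      ↔ (0 ≤ p.1 ∧ p.1 < w ∧ 0 ≤ p.2 ∧ p.2 < h ∧ max |p.1 - c1| |p.2 - c2| = 1) := by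
  obtain ⟨a, b⟩ := p
  simp only [rowA, List.mem_flatMap, List.mem_map, List.mem_filter, List.mem_cons,
    List.not_mem_nil, or_false, decide_eq_true_eq, Prod.ext_iff, not_and,
    cheb_one]
  constructor
  · rintro ⟨dx, hdx, dy, ⟨hdy, hcond⟩, ha, hb⟩
    omega
  · intro hh
    refine ⟨a - c1, by omega, b - c2, ⟨by omega, by omega⟩, by omega, by omega⟩

lemma mem_B_flat (c1 c2 w h : Int) (p : Int × Int) :
    p ∈ (PySem.List.pyRange 0 w 1).flatMap (rowB c1 c2 h)
      ↔ (0 ≤ p.1 ∧ p.1 < w ∧ 0 ≤ p.2 ∧ p.2 < h ∧ max |p.1 - c1| |p.2 - c2| = 1) := by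
  obtain ⟨a, b⟩ := p
  simp only [rowB, List.mem_flatMap, List.mem_map, List.mem_filter,
    PySem.List.mem_pyRange_one, decide_eq_true_eq, Prod.mk.injEq]
  constructor
  · rintro ⟨x, hx, y, ⟨hy, hc⟩, ha, hb⟩
    subst ha; subst hb
    exact ⟨hx.1, hx.2, hy.1, hy.2, hc⟩
  · rintro ⟨h1, h2, h3, h4, h5⟩
    exact ⟨a, ⟨h1, h2⟩, b, ⟨⟨h3, h4⟩, h5⟩, rfl, rfl⟩

lemma pairwise_A_flat (c1 c2 w h : Int) :
    (([-1, 0, 1] : List Int).flatMap (rowA c1 c2 w h)).Pairwise lexLT := by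
  rw [List.pairwise_flatMap]
  constructor
  · intro dx _
    unfold rowA
    rw [List.pairwise_map]
    apply List.Pairwise.filter
    refine List.Pairwise.imp ?_ (by decide : ([-1, 0, 1] : List Int).Pairwise (· < ·))
    intro y1 y2 hy
    exact Or.inr ⟨rfl, by omega⟩
  · refine List.Pairwise.imp ?_ (by decide : ([-1, 0, 1] : List Int).Pairwise (· < ·))
    · intro dx1 dx2 hlt p hp q hq
      obtain ⟨y1, _, hp1⟩ := List.mem_map.mp hp
      obtain ⟨y2, _, hq1⟩ := List.mem_map.mp hq
      exact Or.inl (by rw [← hp1, ← hq1]; simpa using by omega)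

lemma pairwise_B_flat (c1 c2 w h : Int) :
    ((PySem.List.pyRange 0 w 1).flatMap (rowB c1 c2 h)).Pairwise lexLT := by
  rw [List.pairwise_flatMap]
  constructor
  · intro x _
    unfold rowB
    rw [List.pairwise_map]
    apply List.Pairwise.filter
    refine List.Pairwise.imp ?_ (PySem.List.pairwise_lt_pyRange_one 0 h)
    intro y1 y2 hy
    exact Or.inr ⟨rfl, hy⟩
  · refine List.Pairwise.imp ?_ (PySem.List.pairwise_lt_pyRange_one 0 w)
    · intro x1 x2 hlt p hp q hq
      obtain ⟨y1, _, hp1⟩ := List.mem_map.mp hp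
      obtain ⟨y2, _, hq1⟩ := List.mem_map.mp hq
      exact Or.inl (by rw [← hp1, ← hq1]; exact hlt)

theorem get_adj_coords_eq (coord : Int × Int) (grid : List (List Int)) :
    get_adj_coords coord grid = get_adj_coords_alt coord grid := by
  obtain ⟨c1, c2⟩ := coord
  rw [A_eq_flat, B_eq_flat]
  apply eq_of_pairwise_of_mem_iff lexLT lexLT_asymm _ _
    (pairwise_A_flat c1 c2 _ _) (pairwise_B_flat c1 c2 _ _)
  intro p
  rw [mem_A_flat, mem_B_flat]

-- ===== VERDICT (by name: the statement is the Claim_ definition above) =====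
theorem get_adj_coords_spec : Claim_equal_get_adj_coords := by
  intro coord grid _ _
  unfold Spec_get_adj_coords
  exact get_adj_coords_eq coord grid
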